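-- pv_equiv track=rewrite | github.com/antariandel/kyanit | src/kyanit/utils.py | id_from_number
-- ===== SOURCE A (Python) =====
-- _valid_id_colors = {
--     'B': (0, 0, 255),
--     'C': (0, 128, 128),
--     'G': (0, 128, 0),  # brightness compensated
--     'M': (128, 0, 128),
--     'R': (128, 0, 0),  # brightness compensated
--     'W': (85, 85, 85),
--     'Y': (128, 128, 0)
-- }
--
-- def id_from_number(num):
--     max_addr = len(_valid_id_colors) ** 3 - 1
--
--     if num < 0 or num > max_addr:
--         raise ValueError
--
--     base = len(_valid_id_colors)
--     symbols = [key for key in _valid_id_colors]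
--     symbols.sort()
--
--     digits = []
--
--     while num:
--         digits.append(symbols[int(num % base)])
--         num = int(num / base)
--
--     digits.reverse()
--
--     result = ''.join(digits)
--
--     return (symbols[0] * (3 - len(result))) + result  # pad
-- ===== SOURCE B (Python) =====
-- _valid_id_colors = {
--     'B': (0, 0, 255),
--     'C': (0, 128, 128),
--     'G': (0, 128, 0),  # brightness compensated
--     'M': (128, 0, 128),
--     'R': (128, 0, 0),  # brightness compensated
--     'W': (85, 85, 85),
--     'Y': (128, 128, 0)
-- }
--
-- def id_from_number(num):
--     base = len(_valid_id_colors)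
--     if num < 0 or num > base ** 3 - 1:
--         raise ValueError
--     symbols = sorted(_valid_id_colors)
--     n = int(num)
--     return symbols[n // (base * base)] + symbols[(n // base) % base] + symbols[n % base]
-- ===== Notes on version B (the rewrite author's own statement) =====
-- stated objective: simpler
-- what changed: Replaces the while-loop that accumulates digits into a list, reverses it, joins and pads, by a closed-form extraction of the three fixed base-seven digits concatenated directly.
import Mathlib
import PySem

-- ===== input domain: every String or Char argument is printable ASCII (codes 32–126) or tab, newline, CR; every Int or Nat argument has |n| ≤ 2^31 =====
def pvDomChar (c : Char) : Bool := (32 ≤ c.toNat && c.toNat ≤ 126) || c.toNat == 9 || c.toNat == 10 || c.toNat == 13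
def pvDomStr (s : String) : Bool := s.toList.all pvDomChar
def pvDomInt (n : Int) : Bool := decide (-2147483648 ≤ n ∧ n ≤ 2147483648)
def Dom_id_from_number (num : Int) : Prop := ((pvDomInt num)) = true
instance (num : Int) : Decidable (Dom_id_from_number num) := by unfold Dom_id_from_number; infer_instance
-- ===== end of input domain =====

-- ===== PORT A =====
-- B replaces A's digit-accumulating while-loop (list, reverse, join, pad) by a
-- closed-form extraction of the three base-7 digits; objective: simpler.
-- Loop of A, with fuel making it total (num ≤ 342 inside Pre_, so fuel 3 never runs out
-- before num reaches 0; Python's int(num/7) = floor division for the nonnegative num of Pre_).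
def idLoopA : Nat → Int → List String → List String
  | 0, _, digits => digits
  | fuel+1, num, digits =>
    if num ≠ 0 then
      idLoopA fuel (PySem.Int.floordiv num 7)
        (digits ++ [((PySem.List.pyGet? ["B", "C", "G", "M", "R", "W", "Y"] (PySem.Int.mod num 7)).getD "")])
    else digits

def id_from_number (num : Int) : String :=
  let symbols : List String := ["B", "C", "G", "M", "R", "W", "Y"]  -- sorted keys of _valid_id_colors
  let digits := idLoopA 3 num []
  let result := PySem.Str.join "" digits.reverse
  -- symbols[0] * (3 - len(result)): string repetition, ported as join of replicate (exact)
  PySem.Str.join "" (List.replicate (3 - PySem.Str.len result).toNat ((PySem.List.pyGet? symbols 0).getD "")) ++ result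

-- ===== PORT B =====
def id_from_number_alt (num : Int) : String :=
  let symbols : List String := ["B", "C", "G", "M", "R", "W", "Y"]
  ((PySem.List.pyGet? symbols (PySem.Int.floordiv num 49)).getD "")
    ++ ((PySem.List.pyGet? symbols (PySem.Int.mod (PySem.Int.floordiv num 7) 7)).getD "")
    ++ ((PySem.List.pyGet? symbols (PySem.Int.mod num 7)).getD "")

-- ===== PRECONDITION & SPEC =====
-- A raises ValueError for num < 0 or num > 342; Pre_ admits exactly the inputs where A returns.
def Pre_id_from_number (num : Int) : Prop := 0 ≤ num ∧ num ≤ 342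
instance (num : Int) : Decidable (Pre_id_from_number num) := by unfold Pre_id_from_number; infer_instance
def pvWitness_id_from_number : Int := (170)
def Spec_id_from_number (num : Int) (out : String) : Prop := out = id_from_number_alt num
instance (num : Int) (out : String) : Decidable (Spec_id_from_number num out) := by unfold Spec_id_from_number; infer_instance

-- ===== CLAIM (what is proved, stated in full; the proofs are below) =====
def Claim_equal_id_from_number : Prop := ∀ (num : Int), Dom_id_from_number num → Pre_id_from_number num → Spec_id_from_number num (id_from_number num)

-- ===== LEMMAS AND PROOFS =====
set_option maxRecDepth 4000 in
theorem id_from_number_all_small :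
    ∀ k ∈ List.range 343, id_from_number (k : Int) = id_from_number_alt (k : Int) := by
  decide

-- ===== VERDICT (by name: the statement is the Claim_ definition above) =====
theorem id_from_number_spec : Claim_equal_id_from_number := by
  intro num _ hpre
  have h0 : 0 ≤ num := hpre.1
  have h : num = (num.toNat : Int) := (Int.toNat_of_nonneg h0).symm
  have h1 : num ≤ 342 := hpre.2
  have hlt : num.toNat < 343 := by omega
  have := id_from_number_all_small num.toNat (List.mem_range.mpr hlt)
  unfold Spec_id_from_number
  rw [h]
  exact this
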